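-- pv_equiv track=rewrite | github.com/shi0rik0/zml-python | lexer.py | _process_escaping_characters
-- ===== SOURCE A (Python) =====
-- def _process_escaping_characters(s: str, str_symbol: str) -> str:
--     pieces = []
--     i = 0
--     j = s.find('`', i)
--     while j != -1:
--         pieces.append(s[i:j])
--         if j + 1 >= len(s):
--             raise RuntimeError()
--         ch = s[j + 1]
--         if ch == 'n':
--             pieces.append('\n')
--         elif ch == 't':
--             pieces.append('\t')
--         elif ch == 'b':
--             pieces.append('\b')
--         elif ch == 'r':
--             pieces.append('\r')
--         elif ch == str_symbol:
--             pieces.append(ch)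
--         elif ch == '`':
--             pieces.append('`')
--         else:
--             raise RuntimeError()
--         i = j + 2
--         j = s.find('`', i)
--     pieces.append(s[i:])
--     return ''.join(pieces)
-- ===== SOURCE B (Python) =====
-- _ESC_TABLE = {'n': '\n', 't': '\t', 'b': '\b', 'r': '\r', '`': '`'}
--
-- def _process_escaping_characters(s: str, str_symbol: str) -> str:
--     out = []
--     i = 0
--     n = len(s)
--     while i < n:
--         c = s[i]
--         if c == '`':
--             if i + 1 >= n:
--                 raise RuntimeError()
--             ch = s[i + 1]
--             if ch in _ESC_TABLE:
--                 out.append(_ESC_TABLE[ch])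
--             elif ch == str_symbol:
--                 out.append(ch)
--             else:
--                 raise RuntimeError()
--             i += 2
--         else:
--             out.append(c)
--             i += 1
--     return ''.join(out)
-- ===== Notes on version B (the rewrite author's own statement) =====
-- stated objective: idiomatic
-- what changed: Replaced A's find-and-slice segment jumping (str.find for the next backtick, slicing out pieces, joining) with a single character-by-character index walk that appends one character per step and resolves escapes through a translation table.
import Mathlib
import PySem

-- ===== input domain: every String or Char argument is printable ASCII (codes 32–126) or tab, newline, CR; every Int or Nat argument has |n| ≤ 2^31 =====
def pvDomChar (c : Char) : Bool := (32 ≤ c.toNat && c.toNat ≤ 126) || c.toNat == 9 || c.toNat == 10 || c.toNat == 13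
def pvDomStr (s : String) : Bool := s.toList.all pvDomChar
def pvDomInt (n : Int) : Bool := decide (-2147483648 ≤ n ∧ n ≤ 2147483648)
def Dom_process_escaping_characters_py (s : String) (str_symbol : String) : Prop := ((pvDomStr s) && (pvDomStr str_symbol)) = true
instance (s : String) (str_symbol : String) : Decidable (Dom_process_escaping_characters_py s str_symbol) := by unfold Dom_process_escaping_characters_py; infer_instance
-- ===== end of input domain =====

-- B replaces A's find-and-slice segment jumping with a per-character scan using a
-- translation table; equivalence of return values is proved on Pre_ (where A returns).

-- ===== PORT A =====
-- A's while loop: state is the remaining suffix `rest` (= s[i:]); s.find('`', i) becomes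
-- PySem.Chars.find on the suffix, s[i:j] its take, s[j+1] its pyGet?; `none` = the raises.
def pvLoopA (sym : List Char) (rest : List Char) : Option (List (List Char)) :=
  let j : Int := PySem.Chars.find rest ['`']
  if _h : j = -1 then
    some [rest]                                   -- pieces.append(s[i:]); loop ends
  else
    match PySem.List.pyGet? rest (j + 1) with
    | none => none                                -- j + 1 >= len(s): raise RuntimeError()
    | some ch =>
      match (if ch = 'n' then some '\n'
             else if ch = 't' then some '\t'
             else if ch = 'b' then some '\x08'
             else if ch = 'r' then some '\r'
             else if [ch] = sym then some ch
             else if ch = '`' then some '`'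
             else none) with
      | none => none                              -- unknown escape: raise RuntimeError()
      | some p =>
        (pvLoopA sym (rest.drop (j.toNat + 2))).map (fun ps => rest.take j.toNat :: [p] :: ps)
termination_by rest.length
decreasing_by
  have h0 : (0:Int) ≤ PySem.Chars.find rest ['`'] := by
    have := PySem.Chars.neg_one_le_find rest ['`']; omega
  have hs := (PySem.Chars.find_spec h0).1
  have hne : rest.drop (PySem.Chars.find rest ['`']).toNat ≠ [] := by
    intro hnil; rw [hnil] at hs; exact absurd (List.prefix_nil.mp hs) (by simp)
  have hlt : (PySem.Chars.find rest ['`']).toNat < rest.length := by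
    by_contra hge; exact hne (List.drop_eq_nil_of_le (by omega))
  simp only [List.length_drop]; omega

-- ''.join(pieces) on single-piece char lists is flatten; "" stands for the raise (outside Pre_)
def process_escaping_characters_py (s : String) (str_symbol : String) : String :=
  match pvLoopA str_symbol.toList s.toList with
  | none => ""
  | some ps => String.ofList ps.flatten

-- ===== PORT B =====
def pvEscB (sym : List Char) (ch : Char) : Option Char :=
  match [('n', '\n'), ('t', '\t'), ('b', '\x08'), ('r', '\r'), ('`', '`')].lookup ch with
  | some v => some v                              -- ch in _ESC_TABLE
  | none => if [ch] = sym then some ch else none  -- elif ch == str_symbol / else raise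

-- Source B's index walk: one character per step, escapes consume two characters
def pvLoopB (sym : List Char) : List Char → Option (List Char)
  | [] => some []
  | c :: rest =>
    if c = '`' then
      match rest with
      | [] => none                                -- i + 1 >= n: raise RuntimeError()
      | ch :: rest' =>
        match pvEscB sym ch with
        | none => none                            -- raise RuntimeError()
        | some p => (pvLoopB sym rest').map (p :: ·)
    else (pvLoopB sym rest).map (c :: ·)

def process_escaping_characters_py_alt (s : String) (str_symbol : String) : String :=
  match pvLoopB str_symbol.toList s.toList with
  | none => ""
  | some cs => String.ofList cs

-- ===== PRECONDITION & SPEC =====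
-- Pre_ excludes exactly the inputs on which Python A raises RuntimeError: a '`' that is the
-- last character, or a '`' followed by a character that is none of n/t/b/r/'`'/str_symbol.
def pvValidEsc (sym : List Char) : List Char → Bool
  | [] => true
  | c :: rest =>
    if c = '`' then
      match rest with
      | [] => false
      | ch :: rest' =>
        (ch == 'n' || ch == 't' || ch == 'b' || ch == 'r' || ch == '`' || [ch] == sym)
          && pvValidEsc sym rest'
    else pvValidEsc sym rest

def Pre_process_escaping_characters_py (s : String) (str_symbol : String) : Prop :=
  pvValidEsc str_symbol.toList s.toList = true
instance (s : String) (str_symbol : String) : Decidable (Pre_process_escaping_characters_py s str_symbol) := by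
  unfold Pre_process_escaping_characters_py; infer_instance

def pvWitness_process_escaping_characters_py : String × String := ("`n", "'")

def Spec_process_escaping_characters_py (s : String) (str_symbol : String) (out : String) : Prop := out = process_escaping_characters_py_alt s str_symbol
instance (s : String) (str_symbol : String) (out : String) : Decidable (Spec_process_escaping_characters_py s str_symbol out) := by unfold Spec_process_escaping_characters_py; infer_instance

-- ===== CLAIM (what is proved, stated in full; the proofs are below) =====
def Claim_equal_process_escaping_characters_py : Prop := ∀ (s : String) (str_symbol : String), Dom_process_escaping_characters_py s str_symbol → Pre_process_escaping_characters_py s str_symbol → Spec_process_escaping_characters_py s str_symbol (process_escaping_characters_py s str_symbol)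

-- ===== LEMMAS AND PROOFS =====

-- A's if/elif chain and B's table-then-symbol lookup translate every escape char identically
theorem pvEsc_eq (sym : List Char) (ch : Char) :
    (if ch = 'n' then some '\n'
     else if ch = 't' then some '\t'
     else if ch = 'b' then some '\x08'
     else if ch = 'r' then some '\r'
     else if [ch] = sym then some ch
     else if ch = '`' then some '`'
     else none) = pvEscB sym ch := by
  by_cases h1 : ch = 'n'
  · subst h1; simp [pvEscB, List.lookup]
  by_cases h2 : ch = 't'
  · subst h2; simp [pvEscB, List.lookup]
  by_cases h3 : ch = 'b'
  · subst h3; simp [pvEscB, List.lookup]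
  by_cases h4 : ch = 'r'
  · subst h4; simp [pvEscB, List.lookup]
  by_cases h5 : ch = '`'
  · subst h5; simp [pvEscB, List.lookup]
  have e1 : (ch == 'n') = false := by simp [h1]
  have e2 : (ch == 't') = false := by simp [h2]
  have e3 : (ch == 'b') = false := by simp [h3]
  have e4 : (ch == 'r') = false := by simp [h4]
  have e5 : (ch == '`') = false := by simp [h5]
  simp [pvEscB, List.lookup, h1, h2, h3, h4, h5, e1, e2, e3, e4, e5]

-- B copies a backtick-free prefix unchanged before whatever follows
theorem pvLoopB_append (sym pre l : List Char) (h : '`' ∉ pre) :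
    pvLoopB sym (pre ++ l) = (pvLoopB sym l).map (pre ++ ·) := by
  induction pre with
  | nil => simp
  | cons c pre' ih =>
    have hc : c ≠ '`' := by intro hc; exact h (by simp [hc])
    have h' : '`' ∉ pre' := by intro hm; exact h (by simp [hm])
    rw [List.cons_append, pvLoopB.eq_def]
    simp only [if_neg hc, ih h', Option.map_map]
    rfl

theorem pvLoopB_no_bt (sym l : List Char) (h : '`' ∉ l) : pvLoopB sym l = some l := by
  have h0 : pvLoopB sym ([] : List Char) = some [] := rfl
  have := pvLoopB_append sym l [] h
  simpa [h0] using this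

-- the heart of the claim: A's piece list flattens to exactly B's character output
theorem pvLoop_eq (sym : List Char) : ∀ rest : List Char,
    (pvLoopA sym rest).map List.flatten = pvLoopB sym rest := by
  intro rest
  generalize hn : rest.length = n
  induction n using Nat.strong_induction_on generalizing rest with
  | _ n ih =>
  rw [pvLoopA]
  by_cases hfind : PySem.Chars.find rest ['`'] = -1
  · -- no backtick left: A emits the tail piece, B copies it char by char
    have hnotmem : '`' ∉ rest := by
      intro hm
      obtain ⟨u, v, rfl⟩ := List.mem_iff_append.mp hm
      exact (PySem.Chars.find_eq_neg_one_iff _ _).mp hfind ⟨u, v, by simp⟩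
    rw [pvLoopB_no_bt sym rest hnotmem]
    simp [hfind]
  · have h0 : (0:Int) ≤ PySem.Chars.find rest ['`'] := by
      have := PySem.Chars.neg_one_le_find rest ['`']; omega
    obtain ⟨hpre, hmin⟩ := PySem.Chars.find_spec h0
    set jn := (PySem.Chars.find rest ['`']).toNat with hjn
    obtain ⟨t, ht⟩ : ∃ t, rest.drop jn = '`' :: t := by
      obtain ⟨t, ht⟩ := hpre
      exact ⟨t, ht.symm⟩
    have hjlt : jn < rest.length := by
      by_contra hge
      rw [List.drop_eq_nil_of_le (by omega)] at ht
      simp at ht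
    have hlen_take : (rest.take jn).length = jn := by simp; omega
    have hsplit : rest = rest.take jn ++ '`' :: t := by
      conv_lhs => rw [← List.take_append_drop jn rest]
      rw [ht]
    have hnb : '`' ∉ rest.take jn := by
      intro hm
      obtain ⟨i, hi, hget⟩ := List.getElem_of_mem hm
      have hilt : i < jn := by omega
      have hirest : i < rest.length := by omega
      apply hmin i hilt
      refine ⟨rest.drop (i + 1), ?_⟩
      rw [List.singleton_append, List.drop_eq_getElem_cons hirest, ← hget, List.getElem_take]
    have hcast : PySem.Chars.find rest ['`'] + 1 = ((jn + 1 : Nat) : Int) := by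
      push_cast; omega
    have hget1 : PySem.List.pyGet? rest (PySem.Chars.find rest ['`'] + 1) = t[0]? := by
      rw [hcast, PySem.List.pyGet?_natCast, hsplit]
      rw [List.getElem?_append_right (by omega)]
      simp [hlen_take]
    rw [dif_neg hfind, hget1]
    -- B on rest: copy the backtick-free prefix, then handle the escape pair
    conv_rhs => rw [hsplit, pvLoopB_append sym _ _ hnb]
    cases t with
    | nil =>
      -- trailing backtick: both sides are the raise
      simp [pvLoopB]
    | cons ch t' =>
      simp only [List.getElem?_cons_zero]
      rw [pvEsc_eq]
      have hB : pvLoopB sym ('`' :: ch :: t') =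
          match pvEscB sym ch with
          | none => none
          | some p => (pvLoopB sym t').map (p :: ·) := by
        rw [pvLoopB.eq_def]; simp
      rw [hB]
      have hdrop2 : rest.drop (jn + 2) = t' := by
        rw [hsplit, ← hlen_take]
        simp [List.drop_append]
      cases hE : pvEscB sym ch with
      | none => simp
      | some p =>
        have hlenrest : rest.length = jn + 2 + t'.length := by
          conv_lhs => rw [hsplit]
          simp [hlen_take]; omega
        have hIH := ih t'.length (by omega) t' rfl
        rw [hdrop2]
        cases hT : pvLoopA sym t' with
        | none =>
          have hBn : pvLoopB sym t' = none := by rw [← hIH, hT]; rfl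
          simp [hBn]
        | some ps =>
          have hBs : pvLoopB sym t' = some ps.flatten := by rw [← hIH, hT]; rfl
          simp [hBs]

-- ===== VERDICT (by name: the statement is the Claim_ definition above) =====
theorem process_escaping_characters_py_spec : Claim_equal_process_escaping_characters_py := by
  intro s str_symbol _ _
  unfold Spec_process_escaping_characters_py process_escaping_characters_py process_escaping_characters_py_alt
  rw [← pvLoop_eq str_symbol.toList s.toList]
  cases pvLoopA str_symbol.toList s.toList <;> rfl
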